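-- pv_equiv track=rewrite | github.com/johanrex/adventofcode | 2023/day10/day10.py | zoom_in_grid
-- ===== SOURCE A (Python) =====
-- def zoom_in_grid(grid) -> list[list[str]]:
--     def replace(row, col):
--         val = grid[row][col]
--         zoomed = zoom_lookup[val]
--         new_grid_row_offset = 3 * row
--         new_grid_col_offset = 3 * col
--         for r in range(len(zoomed)):
--             for c in range(len(zoomed[r])):
--                 zoomed_in_grid[new_grid_row_offset + r][
--                     new_grid_col_offset + c
--                 ] = zoomed[r][c]
--
--     row_3x = ["."] * 3 * len(grid[0])
--     zoomed_in_grid = [row_3x.copy() for _ in range(3 * len(grid))]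
--
--     zoom_lookup = {
--         "|": [[".", "|", "."], [".", "|", "."], [".", "|", "."]],
--         "-": [[".", ".", "."], ["-", "-", "-"], [".", ".", "."]],
--         "L": [[".", "|", "."], [".", "L", "-"], [".", ".", "."]],
--         "J": [[".", "|", "."], ["-", "J", "."], [".", ".", "."]],
--         "7": [[".", ".", "."], ["-", "7", "."], [".", "|", "."]],
--         "F": [[".", ".", "."], [".", "F", "-"], [".", "|", "."]],
--         ".": [[".", ".", "."], [".", ".", "."], [".", ".", "."]],
--     }
--
--     for row in range(len(grid)):
--         for col in range(len(grid[row])):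
--             replace(row, col)
--
--     return zoomed_in_grid
-- ===== SOURCE B (Python) =====
-- def zoom_in_grid(grid) -> list[list[str]]:
--     # each pipe symbol split into the three sub-rows of its 3x3 block
--     TOP = {"|": [".", "|", "."], "-": [".", ".", "."], "L": [".", "|", "."],
--            "J": [".", "|", "."], "7": [".", ".", "."], "F": [".", ".", "."],
--            ".": [".", ".", "."]}
--     MID = {"|": [".", "|", "."], "-": ["-", "-", "-"], "L": [".", "L", "-"],
--            "J": ["-", "J", "."], "7": ["-", "7", "."], "F": [".", "F", "-"],
--            ".": [".", ".", "."]}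
--     BOT = {"|": [".", "|", "."], "-": [".", ".", "."], "L": [".", ".", "."],
--            "J": [".", ".", "."], "7": [".", "|", "."], "F": [".", "|", "."],
--            ".": [".", ".", "."]}
--     out = []
--     for row in grid:
--         for table in (TOP, MID, BOT):
--             new_row = []
--             for v in row:
--                 new_row.extend(table[v])
--             out.append(new_row)
--     return out
-- ===== Notes on version B (the rewrite author's own statement) =====
-- stated objective: simpler
-- what changed: B splits the 3x3 blocks into three per-subrow tables (TOP/MID/BOT) and builds the output row-by-row by concatenating the sub-rows of each cell, instead of preallocating a 3h x 3w grid of dots and scattering block entries into it by absolute row/column offsets.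
-- crash fix: On the empty grid and on grids of valid pipe cells where some row is longer than the first row, A raises IndexError (len(grid[0]) / scatter out of the preallocated width) while B returns the gathered zoomed grid. — e.g. on zoom_in_grid([]): A raises IndexError, B returns []
import Mathlib
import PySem

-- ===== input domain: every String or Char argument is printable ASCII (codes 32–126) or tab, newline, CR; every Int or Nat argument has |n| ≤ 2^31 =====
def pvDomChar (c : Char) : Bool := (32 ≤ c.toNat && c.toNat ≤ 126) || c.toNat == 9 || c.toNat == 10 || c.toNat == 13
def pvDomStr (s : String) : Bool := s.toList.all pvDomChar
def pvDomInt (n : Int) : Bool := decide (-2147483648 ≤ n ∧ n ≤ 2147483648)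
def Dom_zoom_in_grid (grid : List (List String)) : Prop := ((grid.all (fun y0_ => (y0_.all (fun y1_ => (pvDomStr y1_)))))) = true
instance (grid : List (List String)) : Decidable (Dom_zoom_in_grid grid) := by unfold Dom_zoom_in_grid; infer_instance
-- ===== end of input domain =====

-- B splits each 3x3 block into three per-subrow tables and builds output rows by recursive
-- concatenation instead of scattering into a preallocated 3h x 3w dot grid (objective: simpler).


-- ===== PORT A =====
-- zoom_lookup of A; the `_ => []` branch is Python's KeyError (excluded by Pre_)
def zoomLookupA (v : String) : List (List String) :=
  if v = "|" then [[".", "|", "."], [".", "|", "."], [".", "|", "."]]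
  else if v = "-" then [[".", ".", "."], ["-", "-", "-"], [".", ".", "."]]
  else if v = "L" then [[".", "|", "."], [".", "L", "-"], [".", ".", "."]]
  else if v = "J" then [[".", "|", "."], ["-", "J", "."], [".", ".", "."]]
  else if v = "7" then [[".", ".", "."], ["-", "7", "."], [".", "|", "."]]
  else if v = "F" then [[".", ".", "."], [".", "F", "-"], [".", "|", "."]]
  else if v = "." then [[".", ".", "."], [".", ".", "."], [".", ".", "."]]
  else []

-- Python's `zoomed_in_grid[i][j] = v`; in-range inside Pre_ (out-of-range = IndexError, excluded)
def pySet2 (z : List (List String)) (i j : Nat) (v : String) : List (List String) :=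
  z.set i ((z.getD i []).set j v)

-- the inner helper `replace` of A: the two nested loops writing one cell's block
def writeCell (z : List (List String)) (ro co : Nat) (zoomed : List (List String)) :
    List (List String) :=
  (List.range zoomed.length).foldl (fun z r =>
    (List.range (zoomed.getD r []).length).foldl (fun z c =>
      pySet2 z (ro + r) (co + c) ((zoomed.getD r []).getD c "")) z) z

def zoom_in_grid (grid : List (List String)) : List (List String) :=
  let init := List.replicate (3 * grid.length) (List.replicate (3 * (grid.headD []).length) ".")
  (List.range grid.length).foldl (fun z row =>
    (List.range (grid.getD row []).length).foldl (fun z col =>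
      writeCell z (3 * row) (3 * col) (zoomLookupA ((grid.getD row []).getD col ""))) z) init

-- ===== PORT B =====
-- B's three per-subrow tables; the `else []` branch is Python's KeyError (excluded by Pre_)
def topB (v : String) : List String :=
  if v = "|" then [".", "|", "."] else if v = "-" then [".", ".", "."]
  else if v = "L" then [".", "|", "."] else if v = "J" then [".", "|", "."]
  else if v = "7" then [".", ".", "."] else if v = "F" then [".", ".", "."]
  else if v = "." then [".", ".", "."] else []

def midB (v : String) : List String :=
  if v = "|" then [".", "|", "."] else if v = "-" then ["-", "-", "-"]
  else if v = "L" then [".", "L", "-"] else if v = "J" then ["-", "J", "."]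
  else if v = "7" then ["-", "7", "."] else if v = "F" then [".", "F", "-"]
  else if v = "." then [".", ".", "."] else []

def botB (v : String) : List String :=
  if v = "|" then [".", "|", "."] else if v = "-" then [".", ".", "."]
  else if v = "L" then [".", ".", "."] else if v = "J" then [".", ".", "."]
  else if v = "7" then [".", "|", "."] else if v = "F" then [".", "|", "."]
  else if v = "." then [".", ".", "."] else []

-- the inner `new_row.extend(table[v])` loop of B, as structural recursion on the row
def subRowB (t : String → List String) : List String → List String
  | [] => []
  | v :: vs => t v ++ subRowB t vs

def zoom_in_grid_alt : List (List String) → List (List String)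
  | [] => []
  | row :: rest =>
      subRowB topB row :: subRowB midB row :: subRowB botB row :: zoom_in_grid_alt rest

-- ===== PRECONDITION & SPEC =====
-- Pre_ excludes: empty grids and grids with a row longer than the first (A raises IndexError),
-- cells outside the 7 pipe symbols (A raises KeyError), and jagged shorter rows, on which A's
-- trailing-'.' padding is an accident of its fixed-width preallocation.
def Pre_zoom_in_grid (grid : List (List String)) : Prop :=
  grid ≠ [] ∧
  (∀ row ∈ grid, row.length = (grid.headD []).length) ∧
  (∀ row ∈ grid, ∀ v ∈ row, v ∈ (["|", "-", "L", "J", "7", "F", "."] : List String))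
instance (grid : List (List String)) : Decidable (Pre_zoom_in_grid grid) := by
  unfold Pre_zoom_in_grid; infer_instance

def pvWitness_zoom_in_grid : List (List String) := [["F", "7"], ["L", "J"]]

-- On the empty grid and on grids of valid pipe cells with a row longer than the first row,
-- A raises IndexError while B returns the gathered zoomed grid (proved in zoom_in_grid_raises).
def Raises_zoom_in_grid (grid : List (List String)) : Prop :=
  (∀ row ∈ grid, ∀ v ∈ row, v ∈ (["|", "-", "L", "J", "7", "F", "."] : List String)) ∧
  (grid = [] ∨ ∃ row ∈ grid, (grid.headD []).length < row.length)
instance (grid : List (List String)) : Decidable (Raises_zoom_in_grid grid) := by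
  unfold Raises_zoom_in_grid; infer_instance

def pvRaiseWitness_zoom_in_grid : List (List String) := []
def pvRaiseWitnessOut_zoom_in_grid : List (List String) := []

def Spec_zoom_in_grid (grid : List (List String)) (out : List (List String)) : Prop :=
  out = zoom_in_grid_alt grid
instance (grid : List (List String)) (out : List (List String)) :
    Decidable (Spec_zoom_in_grid grid out) := by unfold Spec_zoom_in_grid; infer_instance

-- ===== CLAIM (what is proved, stated in full; the proofs are below) =====
def Claim_equal_zoom_in_grid : Prop := ∀ (grid : List (List String)), Dom_zoom_in_grid grid →
  Pre_zoom_in_grid grid → Spec_zoom_in_grid grid (zoom_in_grid grid)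

def Claim_raises_zoom_in_grid : Prop :=
  (∀ (grid : List (List String)), Dom_zoom_in_grid grid → Raises_zoom_in_grid grid →
    ¬ Pre_zoom_in_grid grid) ∧
  (Dom_zoom_in_grid (pvRaiseWitness_zoom_in_grid) ∧ Raises_zoom_in_grid (pvRaiseWitness_zoom_in_grid) ∧
    zoom_in_grid_alt (pvRaiseWitness_zoom_in_grid) = pvRaiseWitnessOut_zoom_in_grid)

-- ===== LEMMAS AND PROOFS =====

def pvKeys : List String := ["|", "-", "L", "J", "7", "F", "."]

def gatherRow (cells : List String) (r : Nat) : List String :=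
  cells.flatMap (fun v => (zoomLookupA v).getD r [])

def chunk3 (row : List String) : List (List String) :=
  [gatherRow row 0, gatherRow row 1, gatherRow row 2]

def put3 (l : List String) (co : Nat) (a b c : String) : List String :=
  ((l.set co a).set (co + 1) b).set (co + 2) c

theorem topB_eq (v : String) : topB v = (zoomLookupA v).getD 0 [] := by
  unfold topB zoomLookupA; split_ifs <;> rfl

theorem midB_eq (v : String) : midB v = (zoomLookupA v).getD 1 [] := by
  unfold midB zoomLookupA; split_ifs <;> rfl

theorem botB_eq (v : String) : botB v = (zoomLookupA v).getD 2 [] := by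
  unfold botB zoomLookupA; split_ifs <;> rfl

theorem subRowB_eq_gather (t : String → List String) (r : Nat)
    (ht : ∀ v, t v = (zoomLookupA v).getD r []) (l : List String) :
    subRowB t l = gatherRow l r := by
  induction l with
  | nil => rfl
  | cons v vs ih =>
    rw [subRowB, ih, ht, gatherRow, gatherRow, List.flatMap_cons]

theorem pySet2_shift (pre g : List (List String)) (i j : Nat) (v : String) :
    pySet2 (pre ++ g) (pre.length + i) j v = pre ++ pySet2 g i j v := by
  unfold pySet2
  rw [List.getD, List.getElem?_append_right (by omega)]
  simp

theorem foldl_pre {α : Type} (pre : List (List String))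
    (f g : List (List String) → α → List (List String))
    (h : ∀ z a, f (pre ++ z) a = pre ++ g z a) :
    ∀ (L : List α) (z : List (List String)), L.foldl f (pre ++ z) = pre ++ L.foldl g z := by
  intro L
  induction L with
  | nil => intro z; rfl
  | cons a L ih => intro z; simp only [List.foldl_cons, h]; exact ih _

theorem writeCell_shift (pre g : List (List String)) (ro co : Nat)
    (zm : List (List String)) :
    writeCell (pre ++ g) (pre.length + ro) co zm = pre ++ writeCell g ro co zm := by
  unfold writeCell
  refine foldl_pre pre _ _ (fun z r => ?_) _ g
  refine foldl_pre pre _ _ (fun z c => ?_) _ z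
  rw [Nat.add_assoc]
  exact pySet2_shift _ _ _ _ _

theorem writeCell_block (r0 r1 r2 : List String) (rest : List (List String)) (co : Nat)
    (a0 a1 a2 b0 b1 b2 c0 c1 c2 : String) :
    writeCell (r0 :: r1 :: r2 :: rest) 0 co
        [[a0, a1, a2], [b0, b1, b2], [c0, c1, c2]] =
      put3 r0 co a0 a1 a2 :: put3 r1 co b0 b1 b2 :: put3 r2 co c0 c1 c2 :: rest := rfl

theorem put3_at (A t : List String) (x y z : String) :
    put3 (A ++ "." :: "." :: "." :: t) A.length x y z = A ++ x :: y :: z :: t := by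
  induction A with
  | nil => rfl
  | cons a A ih => simp only [put3, List.cons_append, List.length_cons, List.set_cons_succ] at *
                   rw [ih]

theorem replicate_three (n : Nat) :
    List.replicate (3 * (n + 1)) "." = "." :: "." :: "." :: List.replicate (3 * n) "." := by
  have h : 3 * (n + 1) = 3 * n + 1 + 1 + 1 := by ring
  rw [h]; rfl

theorem block_getD_three {v : String} (hv : v ∈ pvKeys) (r : Nat) (hr : r < 3) :
    ((zoomLookupA v).getD r []).length = 3 := by
  fin_cases hv <;> (interval_cases r <;> rfl)

theorem gather_length (cells : List String) (hv : ∀ v ∈ cells, v ∈ pvKeys)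
    (r : Nat) (hr : r < 3) : (gatherRow cells r).length = 3 * cells.length := by
  induction cells with
  | nil => rfl
  | cons a l ih =>
    have ha := hv a (by simp)
    simp only [gatherRow, List.flatMap_cons, List.length_append, List.length_cons]
    rw [block_getD_three ha r hr]
    have := ih (fun v hv' => hv v (by simp [hv']))
    simp only [gatherRow] at this
    rw [this]; ring

theorem block_shape {v : String} (h : v ∈ pvKeys) :
    ∃ a0 a1 a2 b0 b1 b2 c0 c1 c2 : String,
      zoomLookupA v = [[a0, a1, a2], [b0, b1, b2], [c0, c1, c2]] := by
  fin_cases h <;> exact ⟨_, _, _, _, _, _, _, _, _, rfl⟩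

theorem take_succ_getElem (cells : List String) (s : Nat) (hs : s < cells.length) :
    cells.take (s + 1) = cells.take s ++ [cells[s]] := by
  rw [List.take_add_one, List.getElem?_eq_getElem hs]
  rfl

theorem gather_take_succ (cells : List String) (s : Nat) (hs : s < cells.length) (r : Nat) :
    gatherRow (cells.take (s + 1)) r =
      gatherRow (cells.take s) r ++ (zoomLookupA cells[s]).getD r [] := by
  rw [gatherRow, take_succ_getElem cells s hs, List.flatMap_append]
  simp [gatherRow]

theorem inner_fold (cells : List String) (hv : ∀ v ∈ cells, v ∈ pvKeys) :
    ∀ (n s : Nat), s + n = cells.length → ∀ (rest : List (List String)),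
    (List.range' s n).foldl
      (fun z col => writeCell z 0 (3 * col) (zoomLookupA (cells.getD col ""))) 
      ((gatherRow (cells.take s) 0 ++ List.replicate (3 * n) ".") ::
       (gatherRow (cells.take s) 1 ++ List.replicate (3 * n) ".") ::
       (gatherRow (cells.take s) 2 ++ List.replicate (3 * n) ".") :: rest) =
    gatherRow cells 0 :: gatherRow cells 1 :: gatherRow cells 2 :: rest := by
  intro n
  induction n with
  | zero =>
    intro s hs rest
    have : cells.take s = cells := List.take_of_length_le (by omega)
    simp [this]
  | succ n ih =>
    intro s hs rest
    have hslt : s < cells.length := by omega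
    have hcell : cells.getD s "" = cells[s] := by
      rw [List.getD, List.getElem?_eq_getElem hslt]; rfl
    have hmem : cells[s] ∈ pvKeys := hv _ (List.getElem_mem hslt)
    have hlen : ∀ r, r < 3 → (gatherRow (cells.take s) r).length = 3 * s := by
      intro r hr
      rw [gather_length _ (fun v hv' => hv v (List.mem_of_mem_take hv')) r hr,
        List.length_take_of_le (by omega)]
    have hstep :
        writeCell
          ((gatherRow (cells.take s) 0 ++ List.replicate (3 * (n + 1)) ".") ::
           (gatherRow (cells.take s) 1 ++ List.replicate (3 * (n + 1)) ".") ::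
           (gatherRow (cells.take s) 2 ++ List.replicate (3 * (n + 1)) ".") :: rest)
          0 (3 * s) (zoomLookupA cells[s]) =
        (gatherRow (cells.take (s + 1)) 0 ++ List.replicate (3 * n) ".") ::
        (gatherRow (cells.take (s + 1)) 1 ++ List.replicate (3 * n) ".") ::
        (gatherRow (cells.take (s + 1)) 2 ++ List.replicate (3 * n) ".") :: rest := by
      have e0 := gather_take_succ cells s hslt 0
      have e1 := gather_take_succ cells s hslt 1
      have e2 := gather_take_succ cells s hslt 2
      obtain ⟨a0, a1, a2, b0, b1, b2, c0, c1, c2, hb⟩ := block_shape hmem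
      rw [hb] at e0 e1 e2 ⊢
      rw [replicate_three]
      rw [show (3 * s) = (gatherRow (cells.take s) 0).length from (hlen 0 (by omega)).symm]
      rw [writeCell_block]
      rw [put3_at]
      rw [show (gatherRow (cells.take s) 0).length = (gatherRow (cells.take s) 1).length by
        rw [hlen 0 (by omega), hlen 1 (by omega)], put3_at]
      rw [show (gatherRow (cells.take s) 1).length = (gatherRow (cells.take s) 2).length by
        rw [hlen 1 (by omega), hlen 2 (by omega)], put3_at]
      rw [e0, e1, e2]
      simp
    rw [List.range'_succ, List.foldl_cons, hcell, hstep]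
    exact ih (s + 1) (by omega) rest

theorem chunks_length (l : List (List String)) :
    (l.flatMap chunk3).length = 3 * l.length := by
  induction l with
  | nil => rfl
  | cons a l ih => simp [chunk3, ih]; ring

theorem outer_fold (grid : List (List String)) (w : Nat)
    (hrect : ∀ row ∈ grid, row.length = w)
    (hv : ∀ row ∈ grid, ∀ v ∈ row, v ∈ pvKeys) :
    ∀ (n s : Nat), s + n = grid.length →
    (List.range' s n).foldl
      (fun z row => (List.range (grid.getD row []).length).foldl
        (fun z col =>
          writeCell z (3 * row) (3 * col) (zoomLookupA ((grid.getD row []).getD col ""))) z)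
      ((grid.take s).flatMap chunk3 ++
        List.replicate (3 * n) (List.replicate (3 * w) ".")) =
    grid.flatMap chunk3 := by
  intro n
  induction n with
  | zero =>
    intro s hs
    have : grid.take s = grid := List.take_of_length_le (by omega)
    simp [this]
  | succ n ih =>
    intro s hs
    have hslt : s < grid.length := by omega
    have hrow : grid.getD s [] = grid[s] := by
      rw [List.getD, List.getElem?_eq_getElem hslt]; rfl
    have hdl : ((grid.take s).flatMap chunk3).length = 3 * s := by
      rw [chunks_length, List.length_take_of_le (by omega)]
    rw [List.range'_succ, List.foldl_cons]
    have hshift :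
        (List.range (grid.getD s []).length).foldl
          (fun z col =>
            writeCell z (3 * s) (3 * col) (zoomLookupA ((grid.getD s []).getD col "")))
          ((grid.take s).flatMap chunk3 ++
            List.replicate (3 * (n + 1)) (List.replicate (3 * w) ".")) =
        (grid.take s).flatMap chunk3 ++
          (List.range (grid.getD s []).length).foldl
            (fun z col =>
              writeCell z 0 (3 * col) (zoomLookupA ((grid.getD s []).getD col "")))
            (List.replicate (3 * (n + 1)) (List.replicate (3 * w) ".")) := by
      refine foldl_pre _ _ _ (fun z col => ?_) _ _
      rw [show (3 * s) = ((grid.take s).flatMap chunk3).length + 0 by omega]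
      exact writeCell_shift _ _ _ _ _
    rw [hshift]
    have hwlen : (grid[s] : List String).length = w := hrect _ (List.getElem_mem hslt)
    have hrep : List.replicate (3 * (n + 1)) (List.replicate (3 * w) ".") =
        (gatherRow ((grid[s] : List String).take 0) 0 ++
          List.replicate (3 * (grid[s] : List String).length) ".") ::
        (gatherRow ((grid[s] : List String).take 0) 1 ++
          List.replicate (3 * (grid[s] : List String).length) ".") ::
        (gatherRow ((grid[s] : List String).take 0) 2 ++
          List.replicate (3 * (grid[s] : List String).length) ".") ::
        List.replicate (3 * n) (List.replicate (3 * w) ".") := by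
      have h : 3 * (n + 1) = 3 * n + 1 + 1 + 1 := by ring
      rw [h, hwlen]
      simp [gatherRow, List.replicate_succ]
    rw [hrow, hrep, List.range_eq_range']
    rw [inner_fold grid[s] (hv _ (List.getElem_mem hslt)) (grid[s] : List String).length 0
      (by omega) _]
    have htake : grid.take (s + 1) = grid.take s ++ [grid[s]] := by
      rw [List.take_add_one, List.getElem?_eq_getElem hslt]; rfl
    have := ih (s + 1) (by omega)
    rw [htake] at this
    simp only [List.flatMap_append, List.flatMap_cons, List.flatMap_nil, List.append_nil,
      List.append_assoc] at this ⊢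
    exact this

theorem alt_eq_flatMap (grid : List (List String)) :
    zoom_in_grid_alt grid = grid.flatMap chunk3 := by
  induction grid with
  | nil => rfl
  | cons row rest ih =>
    simp only [zoom_in_grid_alt, List.flatMap_cons, chunk3, ih,
      subRowB_eq_gather topB 0 topB_eq, subRowB_eq_gather midB 1 midB_eq,
      subRowB_eq_gather botB 2 botB_eq]
    rfl

-- ===== VERDICT (by name: the statement is the Claim_ definition above) =====
theorem zoom_in_grid_spec : Claim_equal_zoom_in_grid := by
  intro grid _hdom hpre
  obtain ⟨hne, hrect, hv⟩ := hpre
  unfold Spec_zoom_in_grid zoom_in_grid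
  rw [alt_eq_flatMap]
  have h := outer_fold grid ((grid.headD []).length) hrect hv grid.length 0 (by omega)
  simpa [List.range_eq_range'] using h

@[simp]
theorem zoom_in_grid_raises : Claim_raises_zoom_in_grid := by
  unfold Claim_raises_zoom_in_grid
  refine ⟨?_, by decide⟩
  intro grid _hdom ⟨_, hcase⟩ ⟨hne, hrect, _⟩
  rcases hcase with h | ⟨row, hmem, hlt⟩
  · exact hne h
  · have := hrect row hmem; omega
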